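-- pv_equiv track=rewrite | github.com/samliddicott/mcpash | src/mctash/word_parser.py | _find_ansi_c_single_quote_end
-- ===== SOURCE A (Python) =====
-- def _find_ansi_c_single_quote_end(text: str, start: int) -> int:
--     i = start
--     while i < len(text):
--         ch = text[i]
--         if ch == "\\" and i + 1 < len(text):
--             i += 2
--             continue
--         if ch == "'":
--             return i
--         i += 1
--     return -1
-- ===== SOURCE B (Python) =====
-- def _find_ansi_c_single_quote_end(text: str, start: int) -> int:
--     # Jump between quote candidates with str.find; a candidate quote ends the
--     # string iff the run of backslashes immediately before it (within the
--     # scanned region) has even length.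
--     j = text.find("'", start)
--     while j != -1:
--         k = j
--         while k > start and text[k - 1] == "\\":
--             k -= 1
--         if (j - k) % 2 == 0:
--             return j
--         j = text.find("'", j + 1)
--     return -1
-- ===== Notes on version B (the rewrite author's own statement) =====
-- stated objective: faster
-- what changed: Instead of a per-character Python loop that hops over backslash escape pairs, B jumps directly between quote candidates with C-level str.find and accepts a candidate iff the backslash run immediately before it (within the scanned region) has even length.
-- outside the precondition, e.g. on _find_ansi_c_single_quote_end("'", -1): A returns -1, B returns 0; on _find_ansi_c_single_quote_end("'a", -1): A returns 0, B returns -1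
import Mathlib
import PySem

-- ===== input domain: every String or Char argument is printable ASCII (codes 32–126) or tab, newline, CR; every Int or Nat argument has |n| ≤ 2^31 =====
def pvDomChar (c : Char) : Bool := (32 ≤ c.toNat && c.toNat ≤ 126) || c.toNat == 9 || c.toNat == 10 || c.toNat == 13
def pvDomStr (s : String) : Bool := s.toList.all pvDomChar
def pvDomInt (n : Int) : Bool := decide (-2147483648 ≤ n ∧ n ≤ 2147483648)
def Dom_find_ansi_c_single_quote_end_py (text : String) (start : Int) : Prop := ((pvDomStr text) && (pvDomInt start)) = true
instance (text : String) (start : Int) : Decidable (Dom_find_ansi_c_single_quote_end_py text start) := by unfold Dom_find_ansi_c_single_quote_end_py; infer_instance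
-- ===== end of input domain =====

-- B replaces A's char-by-char scan (which hops over backslash escape pairs) by jumping
-- between quote candidates with str.find and a backslash-run parity test (objective: faster,
-- a constant-factor win measured).

-- ===== PORT A =====
-- the while-loop of A: i scans forward, skipping "\x" pairs, until an unescaped quote
def aScan (cs : List Char) (i : Int) : Int :=
  if _h : i < (cs.length : Int) then
    match PySem.List.pyGet? cs i with
    | none => -1   -- Python IndexError (i below -len); excluded by Pre_
    | some ch =>
      if ch = '\\' ∧ i + 1 < (cs.length : Int) then aScan cs (i + 2)
      else if ch = '\'' then i
      else aScan cs (i + 1)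
  else -1
termination_by ((cs.length : Int) - i).toNat
decreasing_by all_goals omega

def find_ansi_c_single_quote_end_py (text : String) (start : Int) : Int :=
  aScan text.toList start

-- ===== PORT B =====
-- the inner while-loop of B: walk k left over the backslash run, not below `start`
def runStart (cs : List Char) (start : Int) (k : Int) : Int :=
  if _h : start < k ∧ PySem.List.pyGet? cs (k - 1) = some '\\' then runStart cs start (k - 1)
  else k
termination_by (k - start).toNat
decreasing_by omega

-- text.find("'", i), with Python's -1 sentinel decoded into an Option
def findQ (cs : List Char) (i : Int) : Option Int :=
  if PySem.Chars.findFrom cs ['\''] i none = -1 then none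
  else some (PySem.Chars.findFrom cs ['\''] i none)

-- the outer while-loop of B: hop between quote candidates, parity-test the run.
-- Structural recursion on a fuel counter (the entry point passes len+1, which the
-- equivalence proof shows is never exhausted); fuel 0 falls back to -1.
def altScan (cs : List Char) (start : Int) : Nat → Option Int → Int
  | _, none => -1
  | 0, some _ => -1
  | f + 1, some j =>
    if (j - runStart cs start j) % 2 = 0 then j
    else altScan cs start f (findQ cs (j + 1))

def find_ansi_c_single_quote_end_py_alt (text : String) (start : Int) : Int :=
  altScan text.toList start (text.toList.length + 1) (findQ text.toList start)

-- ===== PRECONDITION & SPEC =====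
-- Pre_ excludes negative `start`: there A either raises IndexError (start < -len) or
-- returns accidental negative-indexing results (it scans the tail, then wraps to the
-- front, and can even return -1 for a quote found at index -1, colliding with the
-- not-found sentinel); B returns the ordinary slice-semantics result there.
def Pre_find_ansi_c_single_quote_end_py (text : String) (start : Int) : Prop :=
  0 ≤ start
instance (text : String) (start : Int) : Decidable (Pre_find_ansi_c_single_quote_end_py text start) := by
  unfold Pre_find_ansi_c_single_quote_end_py; infer_instance

def pvWitness_find_ansi_c_single_quote_end_py : String × Int := ("ab\\''", 0)

def Spec_find_ansi_c_single_quote_end_py (text : String) (start : Int) (out : Int) : Prop := out = find_ansi_c_single_quote_end_py_alt text start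
instance (text : String) (start : Int) (out : Int) : Decidable (Spec_find_ansi_c_single_quote_end_py text start out) := by unfold Spec_find_ansi_c_single_quote_end_py; infer_instance

-- ===== CLAIM (what is proved, stated in full; the proofs are below) =====
def Claim_equal_find_ansi_c_single_quote_end_py : Prop := ∀ (text : String) (start : Int), Dom_find_ansi_c_single_quote_end_py text start → Pre_find_ansi_c_single_quote_end_py text start → Spec_find_ansi_c_single_quote_end_py text start (find_ansi_c_single_quote_end_py text start)


-- ===== LEMMAS AND PROOFS =====

-- bounds of a successful find
lemma ffBounds (cs : List Char) (i : Int)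
    (h : PySem.Chars.findFrom cs ['\''] i none ≠ -1) :
    0 ≤ PySem.Chars.findFrom cs ['\''] i none ∧
    PySem.Chars.findFrom cs ['\''] i none < (cs.length : Int) ∧
    (0 ≤ i → i ≤ PySem.Chars.findFrom cs ['\''] i none) := by
  unfold PySem.Chars.findFrom at h ⊢
  simp only at h ⊢
  set st := if i < 0 then if i + (cs.length : Int) < 0 then 0 else i + (cs.length : Int) else i with hst
  have hst0 : 0 ≤ st := by rw [hst]; split_ifs <;> omega
  have hsti : 0 ≤ i → st = i := by intro h0; rw [hst]; split_ifs <;> omega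
  by_cases h1 : (cs.length : Int) < st
  · simp [h1] at h
  · simp only [h1, if_false] at h ⊢
    set r := PySem.Chars.find (List.drop st.toNat (List.take ((cs.length : Int)).toNat cs)) ['\''] with hr
    by_cases h2 : r = -1
    · simp [h2] at h
    · simp only [h2, if_false] at h ⊢
      have hrn : -1 ≤ r := by rw [hr]; exact PySem.Chars.neg_one_le_find _ _
      have h0r : 0 ≤ r := by omega
      have hspec := PySem.Chars.find_spec (s := List.drop st.toNat (List.take ((cs.length : Int)).toNat cs)) (sub := ['\'']) (by rw [← hr]; exact h0r)
      rw [← hr] at hspec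
      have hlen := List.IsPrefix.length_le hspec.1
      simp [List.length_drop] at hlen
      refine ⟨by omega, by omega, fun h0 => by have := hsti h0; omega⟩

lemma findQ_term {cs : List Char} {i j : Int} (h : findQ cs i = some j) :
    0 ≤ j ∧ j < (cs.length : Int) ∧ (0 ≤ i → i ≤ j) := by
  unfold findQ at h
  split_ifs at h with h1
  cases h
  exact ffBounds cs i h1

lemma altScan_none (cs : List Char) (b : Int) (f : ℕ) : altScan cs b f none = -1 := by
  cases f <;> rfl

-- pyGet? at a nonnegative Int index is getElem?
lemma pyGet?_ofNonneg (cs : List Char) (t : Int) (h : 0 ≤ t) :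
    PySem.List.pyGet? cs t = cs[t.toNat]? := by
  conv_lhs => rw [← Int.toNat_of_nonneg h]
  rw [PySem.List.pyGet?_natCast]

lemma singleton_prefix_iff {x : Char} {l : List Char} : [x] <+: l ↔ l.head? = some x := by
  cases l with
  | nil => simp
  | cons y t => simp [List.cons_prefix_cons, List.nil_prefix, eq_comm]

lemma singleton_prefix_drop {cs : List Char} {m : ℕ} {x : Char} :
    [x] <+: cs.drop m ↔ cs[m]? = some x := by
  rw [singleton_prefix_iff, List.head?_drop]

lemma singleton_infix_iff {x : Char} {l : List Char} : [x] <:+: l ↔ x ∈ l := by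
  constructor
  · intro h; exact List.singleton_sublist.mp h.sublist
  · intro h
    obtain ⟨s, t, rfl⟩ := List.append_of_mem h
    exact ⟨s, t, by simp⟩

-- findFrom at or past the end finds nothing
lemma ffGeLen (cs : List Char) (i : Int) (h : (cs.length : Int) ≤ i) :
    PySem.Chars.findFrom cs ['\''] i none = -1 := by
  unfold PySem.Chars.findFrom
  have h0 : ¬ i < 0 := by omega
  simp only [h0, if_false]
  by_cases he : (cs.length : Int) < i
  · simp [he]
  · have : i = (cs.length : Int) := by omega
    subst this
    simp only [lt_irrefl, if_false]
    have hnil : List.drop ((cs.length : Int)).toNat (List.take ((cs.length : Int)).toNat cs) = [] := by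
      simp
    rw [hnil]
    have hf : PySem.Chars.find [] ['\''] = -1 := by
      rw [PySem.Chars.find_eq_neg_one_iff]
      simp [List.infix_nil]
    simp [hf]

lemma findQ_eq_none_iff_ff {cs : List Char} {i : Int} :
    findQ cs i = none ↔ PySem.Chars.findFrom cs ['\''] i none = -1 := by
  unfold findQ
  split_ifs with h <;> simp [h]

lemma findQ_eq_some_ff {cs : List Char} {i j : Int} (h : findQ cs i = some j) :
    PySem.Chars.findFrom cs ['\''] i none = j ∧
    PySem.Chars.findFrom cs ['\''] i none ≠ -1 := by
  unfold findQ at h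
  split_ifs at h with h1
  cases h
  exact ⟨rfl, h1⟩

-- characterizations of findQ on nonnegative start positions
lemma findQ_none_iff {cs : List Char} {i : Int} (h0 : 0 ≤ i) :
    findQ cs i = none ↔
      ∀ t : Int, i ≤ t → t < (cs.length : Int) → PySem.List.pyGet? cs t ≠ some '\'' := by
  by_cases hle : i ≤ (cs.length : Int)
  · have hk : ((i.toNat : ℕ) : Int) = i := Int.toNat_of_nonneg h0
    have hklen : i.toNat ≤ cs.length := by omega
    rw [findQ_eq_none_iff_ff]
    conv_lhs => rw [← hk]
    rw [PySem.Chars.findFrom_natCast_eq_neg_one_iff cs ['\''] i.toNat hklen, singleton_infix_iff]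
    constructor
    · intro hmem t ht1 ht2 hcontr
      apply hmem
      rw [pyGet?_ofNonneg cs t (by omega)] at hcontr
      rw [List.mem_iff_getElem?]
      refine ⟨t.toNat - i.toNat, ?_⟩
      rw [List.getElem?_drop, show i.toNat + (t.toNat - i.toNat) = t.toNat by omega]
      exact hcontr
    · intro hall hmem
      rw [List.mem_iff_getElem?] at hmem
      obtain ⟨a, ha⟩ := hmem
      rw [List.getElem?_drop] at ha
      have halen : i.toNat + a < cs.length := (List.getElem?_eq_some_iff.mp ha).1
      refine hall ((i.toNat + a : ℕ) : Int) (by omega) (by omega) ?_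
      rw [pyGet?_ofNonneg _ _ (by omega), show (((i.toNat + a : ℕ) : Int)).toNat = i.toNat + a by omega]
      exact ha
  · constructor
    · intro _ t ht1 ht2 _
      omega
    · intro _
      rw [findQ_eq_none_iff_ff]
      exact ffGeLen cs i (by omega)

lemma findQ_some {cs : List Char} {i j : Int} (h0 : 0 ≤ i) (h : findQ cs i = some j) :
    i ≤ j ∧ j < (cs.length : Int) ∧ PySem.List.pyGet? cs j = some '\'' ∧
      ∀ t : Int, i ≤ t → t < j → PySem.List.pyGet? cs t ≠ some '\'' := by
  obtain ⟨hff, hne⟩ := findQ_eq_some_ff h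
  obtain ⟨hb0, hb1, hb2⟩ := ffBounds cs i hne
  have hle : i ≤ (cs.length : Int) := by
    by_contra hcon
    exact hne (ffGeLen cs i (by omega))
  have hk : ((i.toNat : ℕ) : Int) = i := Int.toNat_of_nonneg h0
  have hklen : i.toNat ≤ cs.length := by omega
  have hspec := PySem.Chars.findFrom_natCast_spec cs ['\''] i.toNat hklen (by rw [hk]; exact hne)
  rw [hk] at hspec
  obtain ⟨s1, s2, s3⟩ := hspec
  rw [hff] at s1 s2 s3
  rw [hff] at hb0 hb1 hb2
  refine ⟨hb2 h0, by omega, ?_, ?_⟩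
  · rw [pyGet?_ofNonneg cs j (by omega)]
    exact singleton_prefix_drop.mp s2
  · intro t ht1 ht2 hcontr
    have ht0 : 0 ≤ t := by omega
    refine s3 t.toNat (by omega) (by omega) ?_
    rw [singleton_prefix_drop]
    rw [pyGet?_ofNonneg cs t ht0] at hcontr
    exact hcontr

lemma findQ_intro {cs : List Char} {i j : Int} (h0 : 0 ≤ i) (hij : i ≤ j)
    (hjn : j < (cs.length : Int)) (hq : PySem.List.pyGet? cs j = some '\'')
    (hmin : ∀ t : Int, i ≤ t → t < j → PySem.List.pyGet? cs t ≠ some '\'') :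
    findQ cs i = some j := by
  cases hfq : findQ cs i with
  | none => exact absurd hq ((findQ_none_iff h0).mp hfq j hij hjn)
  | some j' =>
    obtain ⟨h1, h2, h3, h4⟩ := findQ_some h0 hfq
    by_cases hlt : j' < j
    · exact absurd h3 (hmin j' h1 hlt)
    · by_cases hgt : j < j'
      · exact absurd hq (h4 j hij hgt)
      · have : j = j' := by omega
        rw [this]

lemma findQ_step {cs : List Char} {i : Int} (h0 : 0 ≤ i)
    (hq : PySem.List.pyGet? cs i ≠ some '\'') : findQ cs i = findQ cs (i + 1) := by
  cases hfq : findQ cs (i + 1) with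
  | none =>
    rw [findQ_none_iff h0]
    intro t ht1 ht2
    by_cases hti : t = i
    · rw [hti]; exact hq
    · exact (findQ_none_iff (by omega)).mp hfq t (by omega) ht2
  | some j =>
    obtain ⟨h1, h2, h3, h4⟩ := findQ_some (by omega) hfq
    exact findQ_intro h0 (by omega) h2 h3
      (fun t ht1 ht2 => by
        by_cases hti : t = i
        · rw [hti]; exact hq
        · exact h4 t (by omega) ht2)

-- runStart lands in [start, k], everything from it up to k is a backslash,
-- and it stopped either at the bound or just right of a non-backslash
lemma runStart_P (cs : List Char) (b j : Int) (hbj : b ≤ j) :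
    b ≤ runStart cs b j ∧ runStart cs b j ≤ j ∧
    (∀ t : Int, runStart cs b j ≤ t → t < j → PySem.List.pyGet? cs t = some '\\') ∧
    (runStart cs b j = b ∨ PySem.List.pyGet? cs (runStart cs b j - 1) ≠ some '\\') := by
  rw [runStart]
  split_ifs with h
  · obtain ⟨a1, a2, a3, a4⟩ := runStart_P cs b (j - 1) (by omega)
    refine ⟨a1, by omega, fun t ht1 ht2 => ?_, a4⟩
    by_cases htj : t = j - 1
    · rw [htj]; exact h.2
    · exact a3 t ht1 (by omega)
  · refine ⟨hbj, le_refl j, fun t ht1 ht2 => by omega, ?_⟩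
    by_cases hb : j = b
    · left; exact hb
    · right; intro hbs2; exact h ⟨by omega, hbs2⟩
termination_by (j - b).toNat

lemma runStart_uniq (cs : List Char) (b j k₁ k₂ : Int)
    (h₁ : b ≤ k₁ ∧ k₁ ≤ j ∧
      (∀ t : Int, k₁ ≤ t → t < j → PySem.List.pyGet? cs t = some '\\') ∧
      (k₁ = b ∨ PySem.List.pyGet? cs (k₁ - 1) ≠ some '\\'))
    (h₂ : b ≤ k₂ ∧ k₂ ≤ j ∧
      (∀ t : Int, k₂ ≤ t → t < j → PySem.List.pyGet? cs t = some '\\') ∧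
      (k₂ = b ∨ PySem.List.pyGet? cs (k₂ - 1) ≠ some '\\')) : k₁ = k₂ := by
  obtain ⟨a1, a2, a3, a4⟩ := h₁
  obtain ⟨b1, b2, b3, b4⟩ := h₂
  by_cases h : k₁ < k₂
  · rcases b4 with hb | hb
    · omega
    · exact absurd (a3 (k₂ - 1) (by omega) (by omega)) hb
  · by_cases h' : k₂ < k₁
    · rcases a4 with ha | ha
      · omega
      · exact absurd (b3 (k₁ - 1) (by omega) (by omega)) ha
    · omega

lemma runStart_eq (cs : List Char) (b b' j : Int) (h0 : b ≤ b') (hbj : b' ≤ j)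
    (hb : PySem.List.pyGet? cs (b' - 1) ≠ some '\\') :
    runStart cs b j = runStart cs b' j := by
  obtain ⟨a1, a2, a3, a4⟩ := runStart_P cs b' j hbj
  refine runStart_uniq cs b j _ _ (runStart_P cs b j (by omega)) ⟨by omega, a2, a3, ?_⟩
  by_cases h : runStart cs b' j = b'
  · right; rw [h]; exact hb
  · rcases a4 with h' | h'
    · exact absurd h' h
    · right; exact h'

lemma runStart_max (cs : List Char) (b j : Int) (h0 : 0 ≤ b) (hbj : b ≤ j) :
    runStart cs b j = max b (runStart cs 0 j) := by
  obtain ⟨a1, a2, a3, a4⟩ := runStart_P cs 0 j (by omega)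
  refine runStart_uniq cs b j _ _ (runStart_P cs b j hbj)
    ⟨by omega, by omega, fun t ht1 ht2 => a3 t (by omega) ht2, ?_⟩
  by_cases h : runStart cs 0 j ≤ b
  · left; omega
  · rcases a4 with h' | h'
    · omega
    · right
      have hm : max b (runStart cs 0 j) = runStart cs 0 j := by omega
      rw [hm]; exact h'

-- skipping an escape pair does not change the parity of the preceding backslash run
lemma parity_skip (cs : List Char) (i j : Int) (h0 : 0 ≤ i) (hij : i + 2 ≤ j)
    (hbs : PySem.List.pyGet? cs i = some '\\') :
    (j - runStart cs i j) % 2 = (j - runStart cs (i + 2) j) % 2 := by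
  rw [runStart_max cs i j h0 (by omega), runStart_max cs (i + 2) j (by omega) (by omega)]
  obtain ⟨a1, a2, a3, a4⟩ := runStart_P cs 0 j (by omega)
  have hne : runStart cs 0 j ≠ i + 1 := by
    intro hx
    rcases a4 with h' | h'
    · omega
    · rw [hx, show i + 1 - 1 = i by omega] at h'
      exact h' hbs
  by_cases hle : runStart cs 0 j ≤ i
  · have e1 : max i (runStart cs 0 j) = i := by omega
    have e2 : max (i + 2) (runStart cs 0 j) = i + 2 := by omega
    rw [e1, e2]; omega
  · have e1 : max i (runStart cs 0 j) = runStart cs 0 j := by omega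
    have e2 : max (i + 2) (runStart cs 0 j) = runStart cs 0 j := by omega
    rw [e1, e2]

-- with sufficient fuel on both sides, the fuel does not influence the result
lemma altScan_fuel (cs : List Char) (b : Int) :
    ∀ (f f' : ℕ) (o : Option Int),
      (∀ j ∈ o, 0 ≤ j ∧ j < (cs.length : Int) ∧
        ((cs.length : Int) - j).toNat < f ∧ ((cs.length : Int) - j).toNat < f') →
      altScan cs b f o = altScan cs b f' o := by
  intro f
  induction f with
  | zero =>
    intro f' o ho
    cases o with
    | none => rw [altScan_none, altScan_none]
    | some j => obtain ⟨h1, h2, h3, h4⟩ := ho j rfl; omega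
  | succ f ih =>
    intro f' o ho
    cases o with
    | none => rw [altScan_none, altScan_none]
    | some j =>
      obtain ⟨h1, h2, h3, h4⟩ := ho j rfl
      cases f' with
      | zero => omega
      | succ f'' =>
        simp only [altScan]
        split_ifs with hp
        · rfl
        · apply ih
          intro j' hj'
          obtain ⟨g1, g2, g3⟩ := findQ_term hj'
          have := g3 (by omega)
          exact ⟨g1, g2, by omega, by omega⟩

-- if the parity decision agrees on every quote position ≥ lo, the outer loops agree
lemma alt_congr (cs : List Char) (b b' lo : Int) (h0 : 0 ≤ lo)
    (H : ∀ j : Int, lo ≤ j → j < (cs.length : Int) → PySem.List.pyGet? cs j = some '\'' →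
      (j - runStart cs b j) % 2 = (j - runStart cs b' j) % 2) :
    ∀ (f : ℕ) (o : Option Int),
      (∀ j ∈ o, lo ≤ j ∧ j < (cs.length : Int) ∧ PySem.List.pyGet? cs j = some '\'') →
      altScan cs b f o = altScan cs b' f o := by
  intro f
  induction f with
  | zero =>
    intro o _
    cases o <;> rfl
  | succ f ih =>
    intro o ho
    cases o with
    | none => rfl
    | some j =>
      obtain ⟨h1, h2, h3⟩ := ho j rfl
      simp only [altScan]
      rw [H j h1 h2 h3]
      split_ifs with hp
      · rfl
      · apply ih
        intro j' hj'
        obtain ⟨f1, f2, f3, f4⟩ := findQ_some (by omega) hj'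
        exact ⟨by omega, f2, f3⟩

-- the main simulation: A's scan from i equals B's hop-loop started at find(i)
lemma main_aux (cs : List Char) :
    ∀ (m : ℕ) (i : Int), 0 ≤ i → ((cs.length : Int) - i).toNat ≤ m →
      aScan cs i = altScan cs i (cs.length + 1) (findQ cs i) := by
  intro m
  induction m with
  | zero =>
    intro i h0 hm
    have hn : ¬ i < (cs.length : Int) := by omega
    rw [aScan, dif_neg hn]
    have hnone : findQ cs i = none := by
      rw [findQ_eq_none_iff_ff]; exact ffGeLen cs i (by omega)
    rw [hnone, altScan_none]
  | succ m ih =>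
    intro i h0 hm
    by_cases hn : i < (cs.length : Int)
    case neg =>
      rw [aScan, dif_neg hn]
      have hnone : findQ cs i = none := by
        rw [findQ_eq_none_iff_ff]; exact ffGeLen cs i (by omega)
      rw [hnone, altScan_none]
    case pos =>
      have hlt : i.toNat < cs.length := by omega
      have hc : PySem.List.pyGet? cs i = some (cs[i.toNat]'hlt) := by
        rw [pyGet?_ofNonneg cs i h0, List.getElem?_eq_getElem hlt]
      set c := cs[i.toNat]'hlt with hcdef
      rw [aScan, dif_pos hn, hc]
      simp only
      by_cases hbs : c = '\\' ∧ i + 1 < (cs.length : Int)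
      case pos =>
        rw [if_pos hbs]
        have hq1 : PySem.List.pyGet? cs i ≠ some '\'' := by
          rw [hc, hbs.1]; decide
        have hcong : altScan cs (i + 2) (cs.length + 1) (findQ cs (i + 2)) =
            altScan cs i (cs.length + 1) (findQ cs (i + 2)) → aScan cs (i + 2) =
            altScan cs i (cs.length + 1) (findQ cs (i + 2)) := by
          intro hx
          rw [ih (i + 2) (by omega) (by omega)]
          exact hx
        by_cases hq2 : PySem.List.pyGet? cs (i + 1) = some '\''
        · -- escaped quote right after the backslash: B skips it by parity 1
          have hfq : findQ cs i = some (i + 1) :=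
            findQ_intro h0 (by omega) hbs.2 hq2 (fun t ht1 ht2 => by
              rw [show t = i by omega]; exact hq1)
          rw [hfq]
          have hrs : runStart cs i (i + 1) = i := by
            rw [runStart, dif_pos ⟨by omega, by rw [show i + 1 - 1 = i by omega, hc, hbs.1]⟩]
            rw [runStart, dif_neg (by rintro ⟨hh, -⟩; omega)]
            omega
          simp only [altScan]
          rw [hrs, if_neg (by omega), show i + 1 + 1 = i + 2 by omega]
          -- restore the fuel, then move the run bound from i+2 back to i
          rw [show altScan cs i cs.length (findQ cs (i + 2)) =
              altScan cs i (cs.length + 1) (findQ cs (i + 2)) from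
            altScan_fuel cs i cs.length (cs.length + 1) (findQ cs (i + 2)) (fun j' hj' => by
              obtain ⟨g1, g2, g3⟩ := findQ_term hj'
              have := g3 (by omega)
              exact ⟨g1, g2, by omega, by omega⟩)]
          apply hcong
          refine alt_congr cs (i + 2) i (i + 2) (by omega) ?_ (cs.length + 1) _ ?_
          · intro j hj1 hj2 hj3
            rw [runStart_eq cs i (i + 2) j (by omega) (by omega)
              (by rw [show i + 2 - 1 = i + 1 by omega, hq2]; decide)]
          · intro j hj
            obtain ⟨f1, f2, f3, f4⟩ := findQ_some (by omega) hj
            exact ⟨f1, f2, f3⟩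
        · -- neither i nor i+1 is a quote: find skips both, parity is unchanged
          have hstep1 : findQ cs i = findQ cs (i + 1) := findQ_step h0 hq1
          have hstep2 : findQ cs (i + 1) = findQ cs (i + 2) := by
            have hx := findQ_step (cs := cs) (i := i + 1) (by omega) hq2
            rw [show i + 1 + 1 = i + 2 by omega] at hx
            exact hx
          rw [hstep1, hstep2]
          apply hcong
          refine alt_congr cs (i + 2) i (i + 2) (by omega) ?_ (cs.length + 1) _ ?_
          · intro j hj1 hj2 hj3
            exact (parity_skip cs i j h0 (by omega) (by rw [hc, hbs.1])).symm
          · intro j hj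
            obtain ⟨f1, f2, f3, f4⟩ := findQ_some (by omega) hj
            exact ⟨f1, f2, f3⟩
      case neg =>
        rw [if_neg hbs]
        by_cases hq : c = '\''
        · -- unescaped quote at i: both return i
          rw [if_pos hq]
          have hfq : findQ cs i = some i :=
            findQ_intro h0 (le_refl i) hn (by rw [hc, hq]) (fun t ht1 ht2 => by omega)
          rw [hfq]
          simp only [altScan]
          have hrs : runStart cs i i = i := by
            rw [runStart, dif_neg (by rintro ⟨hh, -⟩; omega)]
          rw [hrs, if_pos (by omega)]
        · rw [if_neg hq]
          have hq1 : PySem.List.pyGet? cs i ≠ some '\'' := by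
            rw [hc]; intro hh; simp only [Option.some.injEq] at hh; exact hq hh
          rw [findQ_step h0 hq1]
          by_cases hbs2 : c = '\\'
          · -- trailing backslash at the last position: no quote can follow
            have hge : (cs.length : Int) ≤ i + 1 := by
              by_contra hcon; exact hbs ⟨hbs2, by omega⟩
            have hnone : findQ cs (i + 1) = none := by
              rw [findQ_eq_none_iff_ff]; exact ffGeLen cs (i + 1) hge
            rw [hnone, ih (i + 1) (by omega) (by omega), hnone, altScan_none, altScan_none]
          · -- ordinary character: simple step
            rw [ih (i + 1) (by omega) (by omega)]
            refine alt_congr cs (i + 1) i (i + 1) (by omega) ?_ (cs.length + 1) _ ?_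
            · intro j hj1 hj2 hj3
              rw [runStart_eq cs i (i + 1) j (by omega) (by omega)
                (by rw [show i + 1 - 1 = i by omega, hc]
                    intro hh; simp only [Option.some.injEq] at hh; exact hbs2 hh)]
            · intro j hj
              obtain ⟨f1, f2, f3, f4⟩ := findQ_some (by omega) hj
              exact ⟨f1, f2, f3⟩

-- ===== VERDICT (by name: the statement is the Claim_ definition above) =====
theorem find_ansi_c_single_quote_end_py_spec : Claim_equal_find_ansi_c_single_quote_end_py := by
  intro text start _dom hpre
  unfold Pre_find_ansi_c_single_quote_end_py at hpre
  unfold Spec_find_ansi_c_single_quote_end_py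
  unfold find_ansi_c_single_quote_end_py find_ansi_c_single_quote_end_py_alt
  exact main_aux text.toList (text.toList.length + 1) start hpre (by omega)
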